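-- pv_equiv track=rewrite | github.com/imejcab/Programacion | Boletin4/Ejercicio5y6.py | calcular_formula
-- ===== SOURCE A (Python) =====
-- def calcular_formula (n,i):
--     contador=1
--     acumulador=1
--     n_new=0
--     n_total=n
--     resultado=n
--     while(contador!=i):
--         acumulador=acumulador*10
--         n_new=n*acumulador
--         n_total+=n_new
--         resultado+=n_total
--         contador+=1
--     return resultado
-- ===== SOURCE B (Python) =====
-- def _pow10(e):
--     # binary (fast) exponentiation: 10**e
--     r = 1
--     b = 10
--     while e > 0:
--         if e & 1:
--             r *= b
--         b *= b
--         e >>= 1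
--     return r
--
-- def calcular_formula(n, i):
--     return n * ((_pow10(i + 1) - 10) // 9 - i) // 9
-- ===== Notes on version B (the rewrite author's own statement) =====
-- stated objective: faster
-- what changed: Replaced A's O(i)-iteration bigint accumulation loop by the closed form n*((10^(i+1)-10)//9 - i)//9 computed with built-in fast exponentiation.
import Mathlib
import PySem

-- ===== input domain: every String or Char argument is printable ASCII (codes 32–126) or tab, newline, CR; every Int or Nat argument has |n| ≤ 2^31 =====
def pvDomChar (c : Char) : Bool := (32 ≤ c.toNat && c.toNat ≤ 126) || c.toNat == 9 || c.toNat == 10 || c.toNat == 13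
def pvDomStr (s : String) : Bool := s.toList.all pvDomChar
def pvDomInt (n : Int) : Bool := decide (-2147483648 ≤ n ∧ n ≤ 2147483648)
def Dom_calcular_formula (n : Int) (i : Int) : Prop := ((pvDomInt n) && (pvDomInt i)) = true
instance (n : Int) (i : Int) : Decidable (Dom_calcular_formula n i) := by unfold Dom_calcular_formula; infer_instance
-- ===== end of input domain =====

-- B replaces A's O(i) accumulation loop by the closed form n*((10^(i+1)-10)/9 - i)/9 (fast exponentiation); simpler and asymptotically faster.

-- ===== PORT A =====
-- while(contador != i): fuel = (i - contador).toNat steps; for i ≥ 1 this is exactly the Python loop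
-- (for i < 1 the Python loops forever — excluded by Pre_).
def calcAux (n i : Int) (contador acumulador n_total resultado : Int) : Nat → Int
  | 0 => resultado
  | fuel + 1 =>
    if contador ≠ i then
      let acumulador := acumulador * 10
      let n_new := n * acumulador
      let n_total := n_total + n_new
      let resultado := resultado + n_total
      calcAux n i (contador + 1) acumulador n_total resultado fuel
    else resultado

def calcular_formula (n : Int) (i : Int) : Int :=
  calcAux n i 1 1 n n (i - 1).toNat

-- ===== PORT B =====
-- _pow10's while loop: binary exponentiation, recursion on e (e >>= 1 halves e each turn)
def pow10Aux (r b : Int) (e : Nat) : Int :=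
  if h : e = 0 then r
  else pow10Aux (if e % 2 = 1 then r * b else r) (b * b) (e / 2)
decreasing_by exact Nat.div_lt_self (Nat.pos_of_ne_zero h) (by norm_num)

def calcular_formula_alt (n : Int) (i : Int) : Int :=
  PySem.Int.floordiv (n * (PySem.Int.floordiv (pow10Aux 1 10 (i + 1).toNat - 10) 9 - i)) 9

-- ===== PRECONDITION & SPEC =====
-- A's while loop never terminates for i < 1 (contador starts at 1 and only increases).
def Pre_calcular_formula (n : Int) (i : Int) : Prop := 1 ≤ i
instance (n : Int) (i : Int) : Decidable (Pre_calcular_formula n i) := by unfold Pre_calcular_formula; infer_instance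
def pvWitness_calcular_formula : Int × Int := (3, 4)

def Spec_calcular_formula (n : Int) (i : Int) (out : Int) : Prop := out = calcular_formula_alt n i
instance (n : Int) (i : Int) (out : Int) : Decidable (Spec_calcular_formula n i out) := by unfold Spec_calcular_formula; infer_instance

-- ===== CLAIM (what is proved, stated in full; the proofs are below) =====
def Claim_equal_calcular_formula : Prop := ∀ (n : Int) (i : Int), Dom_calcular_formula n i → Pre_calcular_formula n i → Spec_calcular_formula n i (calcular_formula n i)

-- ===== LEMMAS AND PROOFS =====

-- SS m = 10 + 10^2 + … + 10^(m+1)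
def SS : Nat → Int
  | 0 => 10
  | m + 1 => SS m + 10 ^ (m + 2)

-- TT m = R_1 + … + R_{m+1} where R_k is the k-digit repunit (the value both programs compute times n)
def TT : Nat → Int
  | 0 => 1
  | m + 1 => TT m + SS m + 1

lemma pow_eq_SS (m : Nat) : (10 : Int) ^ (m + 2) - 10 = 9 * SS m := by
  induction m with
  | zero => decide
  | succ k ih =>
    have h10 : (10 : Int) ^ (k + 1 + 2) = 10 * 10 ^ (k + 2) := by ring
    simp only [SS]
    rw [h10]; linarith

lemma SS_eq_TT (m : Nat) : SS m - (m + 1) = 9 * TT m := by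
  induction m with
  | zero => simp [SS, TT]
  | succ k ih =>
    have h := pow_eq_SS k
    simp only [SS, TT]
    push_cast
    linarith

lemma calcAux_closed (n : Int) (m : Nat) : ∀ (c a t r : Int),
    81 * calcAux n (c + m) c a t r m
      = 81 * r + 81 * m * t + n * a * ((10 : Int) ^ (m + 2) - 100 - 90 * m) := by
  induction m with
  | zero => intro c a t r; simp [calcAux]
  | succ k ih =>
    intro c a t r
    have hc : c ≠ c + (k + 1 : Nat) := by push_cast; omega
    simp only [calcAux, hc, if_true, ne_eq, not_false_eq_true]
    have : (c : Int) + ((k : Nat) + 1 : Nat) = (c + 1) + (k : Nat) := by push_cast; ring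
    rw [this, ih (c + 1) (a * 10) (t + n * (a * 10)) (r + (t + n * (a * 10)))]
    have hp : (10 : Int) ^ (k + 1 + 2) = 10 * 10 ^ (k + 2) := by ring
    rw [hp]
    push_cast
    ring

lemma floordiv_mul_nine (k : Int) : PySem.Int.floordiv (9 * k) 9 = k := by
  rw [PySem.Int.floordiv_eq_ediv_of_pos (by norm_num)]
  omega

lemma pow10Aux_eq (e : Nat) : ∀ (r b : Int), pow10Aux r b e = r * b ^ e := by
  induction e using Nat.strong_induction_on with
  | _ e ih =>
    intro r b
    unfold pow10Aux
    split
    · rename_i h; subst h; simp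
    · rename_i h
      rw [ih (e / 2) (Nat.div_lt_self (Nat.pos_of_ne_zero h) (by norm_num))]
      have hsplit : e = 2 * (e / 2) + e % 2 := (Nat.div_add_mod e 2).symm ▸ by omega
      have hbb : (b * b) ^ (e / 2) = b ^ (2 * (e / 2)) := by
        rw [two_mul, pow_add]; ring
      by_cases h2 : e % 2 = 1
      · simp only [h2, if_true]
        conv_rhs => rw [hsplit, h2]
        rw [pow_add, hbb]; ring
      · have h0 : e % 2 = 0 := by omega
        simp only [h2, if_false]
        conv_rhs => rw [hsplit, h0]
        rw [pow_add, hbb]; ring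

lemma alt_eq_TT (n : Int) (m : Nat) : calcular_formula_alt n (m + 1) = n * TT m := by
  unfold calcular_formula_alt
  have h1 : ((m : Int) + 1 + 1).toNat = m + 2 := by omega
  rw [h1, pow10Aux_eq, one_mul, pow_eq_SS, floordiv_mul_nine]
  have h2 : n * (SS m - ((m : Int) + 1)) = 9 * (n * TT m) := by
    rw [SS_eq_TT m]; ring
  rw [h2, floordiv_mul_nine]

-- ===== VERDICT (by name: the statement is the Claim_ definition above) =====
theorem calcular_formula_spec : Claim_equal_calcular_formula := by
  intro n i _ hpre
  unfold Spec_calcular_formula Pre_calcular_formula at *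
  obtain ⟨m, hm⟩ : ∃ m : Nat, i = (m : Int) + 1 :=
    ⟨(i - 1).toNat, by omega⟩
  subst hm
  rw [alt_eq_TT]
  unfold calcular_formula
  have hfuel : ((m : Int) + 1 - 1).toNat = m := by omega
  rw [hfuel]
  have h1 : (1 : Int) + (m : Nat) = (m : Int) + 1 := by ring
  have key := calcAux_closed n m 1 1 n n
  rw [h1] at key
  have e1 : n * (9 * TT m) = n * (SS m - ((m : Int) + 1)) := by rw [SS_eq_TT m]
  have e2 : n * (9 * SS m) = n * ((10 : Int) ^ (m + 2) - 10) := by rw [pow_eq_SS m]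
  have goal81 : 81 * calcAux n ((m : Int) + 1) 1 1 n n m = 81 * (n * TT m) := by
    ring_nf at key e1 e2 ⊢
    linarith
  exact mul_left_cancel₀ (by norm_num : (81 : Int) ≠ 0) goal81
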